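-- pv_equiv track=rewrite | github.com/HaroldMills/Vesper | scripts/detector_eval/manual/analyze_classification_edits.py | count_changes
-- ===== SOURCE A (Python) =====
-- from collections import defaultdict
--
-- def count_changes(history_counts):
--
--     change_counts = defaultdict(int)
--
--     for edits, count in history_counts.items():
--
--         if edits[-1][0] == 'dleick':
--             # Debbie made final edit in this history
--
--             debbie_classification = edits[-1][1]
--
--             i = find_final_carrie_edit(edits)
--
--             if i == -1:
--                 # history includes no Carrie edits
--
--                 accumulate_change_count(
--                     change_counts, 'Unclassified', debbie_classification,
--                     count)
--
--             else:
--                 # history includes at least one Carrie edit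
--
--                 carrie_classification = edits[i][1]
--
--                 accumulate_change_count(
--                     change_counts, carrie_classification,
--                     debbie_classification, count)
--
--     return change_counts
--
-- def find_final_carrie_edit(edits):
--
--     for i, (name, _) in enumerate(reversed(edits)):
--         if name == 'cvoss':
--             return len(edits) - i - 1
--
--     return -1
--
-- def accumulate_change_count(change_counts, old, new, count):
--     if new != old and not (old == 'Unclassified' and new == 'Noise'):
--         change_counts[(old, new)] += count
-- ===== SOURCE B (Python) =====
-- def count_changes(history_counts):
--     # Staged group-by: collect change events, dedup the keys in first-occurrence
--     # order, then sum each key's counts with a per-key scan (no running dict).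
--     events = []
--     for edits, count in history_counts.items():
--         last_name, new = edits[-1]
--         if last_name == 'dleick':
--             old = (['Unclassified'] + [c for n, c in edits if n == 'cvoss'])[-1]
--             if new != old and not (old == 'Unclassified' and new == 'Noise'):
--                 events.append(((old, new), count))
--     keys = dict.fromkeys(key for key, _ in events)
--     return {key: sum(c for k, c in events if k == key) for key in keys}
-- ===== Notes on version B (the rewrite author's own statement) =====
-- stated objective: simpler
-- what changed: Replaces the reversed-enumerate index search with a comprehension taking the last Carrie classification, and the running defaultdict with a staged group-by: collect change events, dedup keys in first-occurrence order via dict.fromkeys, then sum each key's counts with its own scan.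
-- outside the precondition, e.g. on count_changes({(): 1}): A raises IndexError, B raises IndexError
import Mathlib
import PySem

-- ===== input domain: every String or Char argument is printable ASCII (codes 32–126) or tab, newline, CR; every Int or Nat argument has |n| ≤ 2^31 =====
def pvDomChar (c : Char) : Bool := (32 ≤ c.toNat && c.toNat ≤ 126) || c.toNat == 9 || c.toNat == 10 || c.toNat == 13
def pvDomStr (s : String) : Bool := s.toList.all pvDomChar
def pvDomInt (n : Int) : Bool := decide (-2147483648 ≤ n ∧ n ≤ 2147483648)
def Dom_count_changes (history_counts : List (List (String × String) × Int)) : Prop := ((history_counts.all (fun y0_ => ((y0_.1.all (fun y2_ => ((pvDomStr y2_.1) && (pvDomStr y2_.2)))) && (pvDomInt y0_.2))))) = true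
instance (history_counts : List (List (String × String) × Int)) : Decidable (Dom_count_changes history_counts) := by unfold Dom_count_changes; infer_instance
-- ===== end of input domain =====

-- B replaces A's reversed-enumerate index search and running defaultdict with staged passes:
-- a comprehension takes the last Carrie classification, keys are deduped in first-occurrence
-- order, and each key's total is summed by its own scan over the event list (simpler group-by).


-- ===== PORT A =====
def pvFindLoop (len : Int) : List (String × String) → Int → Int
  | [], _ => -1
  | (name, _) :: rest, i => if name = "cvoss" then len - i - 1 else pvFindLoop len rest (i + 1)

def find_final_carrie_edit (edits : List (String × String)) : Int :=
  pvFindLoop (edits.length : Int) edits.reverse 0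

def accumulate_change_count (change_counts : PySem.Dict (String × String) Int)
    (old new : String) (count : Int) : PySem.Dict (String × String) Int :=
  if new ≠ old ∧ ¬(old = "Unclassified" ∧ new = "Noise") then
    change_counts.insert (old, new) (change_counts.getD (old, new) 0 + count)
  else change_counts

def count_changes (history_counts : List (List (String × String) × Int)) : List (String × String × Int) :=
  let d := history_counts.foldl (fun change_counts p =>
    match PySem.List.pyGet? p.1 (-1) with
    | none => change_counts   -- Python raises IndexError here (edits = []); excluded by Pre_
    | some last =>
      if last.1 = "dleick" then
        let i := find_final_carrie_edit p.1
        if i = -1 then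
          accumulate_change_count change_counts "Unclassified" last.2 p.2
        else
          match PySem.List.pyGet? p.1 i with
          | none => change_counts   -- unreachable: the helper returns an in-range index
          | some e => accumulate_change_count change_counts e.2 last.2 p.2
      else change_counts) PySem.Dict.empty
  d.items.map (fun q => (q.1.1, q.1.2, q.2))

-- ===== PORT B =====
-- (['Unclassified'] + [c for n, c in edits if n == 'cvoss'])[-1]; the list is nonempty,
-- so Python's [-1] is exactly getLastD of the cons (List.getLastD_cons).
def pvOldB (edits : List (String × String)) : String :=
  ("Unclassified" :: edits.filterMap (fun e => if e.1 = "cvoss" then some e.2 else none)).getLastD ""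

def count_changes_alt (history_counts : List (List (String × String) × Int)) : List (String × String × Int) :=
  let events := history_counts.foldl (fun evs p =>
    match PySem.List.pyGet? p.1 (-1) with
    | none => evs   -- Python raises IndexError here (edits = []); excluded by Pre_
    | some last =>
      if last.1 = "dleick" then
        let old := pvOldB p.1
        if last.2 ≠ old ∧ ¬(old = "Unclassified" ∧ last.2 = "Noise") then
          evs ++ [((old, last.2), p.2)]
        else evs
      else evs) []
  let keys := PySem.Set.ofList (events.map (·.1))   -- dict.fromkeys: first-occurrence ordered dedup
  keys.map (fun k => (k.1, k.2, ((events.filter (fun q => q.1 == k)).map (·.2)).sum))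

-- ===== PRECONDITION & SPEC =====
-- Pre_ excludes histories with an empty edit list (edits[-1] raises IndexError in both A and B)
-- and lists whose edit-list keys repeat (a Python dict argument cannot hold duplicate keys, so
-- such association lists do not represent any input A receives).
def Pre_count_changes (history_counts : List (List (String × String) × Int)) : Prop :=
  (∀ p ∈ history_counts, p.1 ≠ []) ∧ (history_counts.map Prod.fst).Nodup
instance (history_counts : List (List (String × String) × Int)) : Decidable (Pre_count_changes history_counts) := by unfold Pre_count_changes; infer_instance
def pvWitness_count_changes : (List (List (String × String) × Int)) :=
  [([("cvoss", "Call"), ("dleick", "Noise")], 2), ([("dleick", "Call")], 1)]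

def Spec_count_changes (history_counts : List (List (String × String) × Int)) (out : List (String × String × Int)) : Prop := out = count_changes_alt history_counts
instance (history_counts : List (List (String × String) × Int)) (out : List (String × String × Int)) : Decidable (Spec_count_changes history_counts out) := by unfold Spec_count_changes; infer_instance

-- ===== CLAIM (what is proved, stated in full; the proofs are below) =====
def Claim_equal_count_changes : Prop := ∀ (history_counts : List (List (String × String) × Int)), Dom_count_changes history_counts → Pre_count_changes history_counts → Spec_count_changes history_counts (count_changes history_counts)

-- ===== LEMMAS AND PROOFS =====

-- the last Carrie classification as a forward fold (proof-internal reading of both programs)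
def pvCarrieOld (edits : List (String × String)) : String :=
  edits.foldl (fun old e => if e.1 = "cvoss" then e.2 else old) "Unclassified"

-- B's filter-then-last computation equals the forward fold
theorem foldl_filterMap_getLastD (edits : List (String × String)) : ∀ init : String,
    edits.foldl (fun old e => if e.1 = "cvoss" then e.2 else old) init
      = (edits.filterMap (fun e => if e.1 = "cvoss" then some e.2 else none)).getLastD init := by
  induction edits with
  | nil => intro init; rfl
  | cons e rest ih =>
    intro init
    obtain ⟨n, c⟩ := e
    by_cases h : n = "cvoss"
    · simp only [List.filterMap_cons, List.foldl_cons, h, if_true, List.getLastD_cons]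
      exact ih c
    · simp only [List.filterMap_cons, List.foldl_cons, if_neg h]
      exact ih init

theorem pvOldB_eq_fold (edits : List (String × String)) : pvOldB edits = pvCarrieOld edits := by
  unfold pvOldB pvCarrieOld
  rw [List.getLastD_cons]
  exact (foldl_filterMap_getLastD edits "Unclassified").symm

-- shifting the running index of A's reverse scan
theorem pvFindLoop_shift (r : List (String × String)) : ∀ (len i : Int),
    pvFindLoop (len + 1) r (i + 1) = pvFindLoop len r i := by
  induction r with
  | nil => intro len i; rfl
  | cons x rest ih =>
    intro len i
    obtain ⟨name, c⟩ := x
    simp only [pvFindLoop]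
    split_ifs with h
    · omega
    · exact ih len (i + 1)

-- the events contributed by one history, as B collects them
def pvEventsOf (p : List (String × String) × Int) : List ((String × String) × Int) :=
  match PySem.List.pyGet? p.1 (-1) with
  | none => []
  | some last =>
    if last.1 = "dleick" then
      let old := pvCarrieOld p.1
      if last.2 ≠ old ∧ ¬(old = "Unclassified" ∧ last.2 = "Noise") then
        [((old, last.2), p.2)]
      else []
    else []

-- bounds for A's reverse scan result
theorem pvFindLoop_bounds (r : List (String × String)) : ∀ (len i : Int),
    pvFindLoop len r i = -1 ∨
      (len - i - (r.length : Int) ≤ pvFindLoop len r i ∧ pvFindLoop len r i < len - i) := by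
  induction r with
  | nil => intro len i; left; rfl
  | cons x rest ih =>
    intro len i
    obtain ⟨name, c⟩ := x
    simp only [pvFindLoop, List.length_cons]
    split_ifs with h
    · right; push_cast; omega
    · rcases ih len (i + 1) with h1 | ⟨h2, h3⟩
      · left; exact h1
      · right; push_cast at h2 h3 ⊢; omega

-- A's reverse index search agrees with the forward fold
theorem carrie_main (edits : List (String × String)) :
    (find_final_carrie_edit edits = -1 ∧ pvCarrieOld edits = "Unclassified") ∨
    (∃ e, PySem.List.pyGet? edits (find_final_carrie_edit edits) = some e ∧
      e.2 = pvCarrieOld edits ∧ find_final_carrie_edit edits ≠ -1) := by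
  induction edits using List.reverseRecOn with
  | nil => left; exact ⟨rfl, rfl⟩
  | append_singleton xs x ih =>
    obtain ⟨name, c⟩ := x
    have hfold : pvCarrieOld (xs ++ [(name, c)]) =
        if name = "cvoss" then c else pvCarrieOld xs := by
      simp [pvCarrieOld, List.foldl_append]
    by_cases hn : name = "cvoss"
    · right
      have hfind : find_final_carrie_edit (xs ++ [(name, c)]) = (xs.length : Int) := by
        simp only [find_final_carrie_edit, List.reverse_append, List.reverse_singleton,
          List.singleton_append, pvFindLoop, hn, List.length_append,
          List.length_singleton]
        push_cast; ring
      refine ⟨(name, c), ?_, ?_, ?_⟩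
      · rw [hfind]
        exact PySem.List.pyGet?_append_length xs [] (name, c)
      · rw [hfold, if_pos hn]
      · rw [hfind]; omega
    · have hfind : find_final_carrie_edit (xs ++ [(name, c)]) = find_final_carrie_edit xs := by
        simp only [find_final_carrie_edit, List.reverse_append, List.reverse_singleton,
          List.singleton_append, pvFindLoop, if_neg hn, List.length_append,
          List.length_singleton]
        have h1 : ((xs.length + 1 : Nat) : Int) = (xs.length : Int) + 1 := by push_cast; ring
        rw [h1]
        exact pvFindLoop_shift xs.reverse (xs.length : Int) 0
      rcases ih with ⟨h1, h2⟩ | ⟨e, hget, hval, hne⟩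
      · left
        refine ⟨by rw [hfind, h1], ?_⟩
        rw [hfold, if_neg hn, h2]
      · right
        have hrange : 0 ≤ find_final_carrie_edit xs ∧
            find_final_carrie_edit xs < (xs.length : Int) := by
          rcases pvFindLoop_bounds xs.reverse (xs.length : Int) 0 with hb | ⟨hb1, hb2⟩
          · exact absurd hb hne
          · simp only [List.length_reverse] at hb1 hb2
            exact ⟨by unfold find_final_carrie_edit; omega,
                   by unfold find_final_carrie_edit; omega⟩
        refine ⟨e, ?_, by rw [hfold, if_neg hn, hval], by rw [hfind]; exact hne⟩
        rw [hfind]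
        rw [PySem.List.pyGet?_of_nonneg _ hrange.1] at hget ⊢
        rw [List.getElem?_append_left (by omega : (find_final_carrie_edit xs).toNat < xs.length)]
        exact hget

-- one history contributes the same dict update in A as inserting its events one by one
theorem step_eq (d : PySem.Dict (String × String) Int) (p : List (String × String) × Int) :
    (match PySem.List.pyGet? p.1 (-1) with
     | none => d
     | some last =>
       if last.1 = "dleick" then
         let i := find_final_carrie_edit p.1
         if i = -1 then accumulate_change_count d "Unclassified" last.2 p.2
         else
           match PySem.List.pyGet? p.1 i with
           | none => d
           | some e => accumulate_change_count d e.2 last.2 p.2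
       else d) =
    (pvEventsOf p).foldl
      (fun d (q : (String × String) × Int) => d.insert q.1 (d.getD q.1 0 + q.2)) d := by
  unfold pvEventsOf
  cases hg : PySem.List.pyGet? p.1 (-1) with
  | none => rfl
  | some last =>
    dsimp only
    by_cases hd : last.1 = "dleick"
    · rw [if_pos hd, if_pos hd]
      rcases carrie_main p.1 with ⟨h1, h2⟩ | ⟨e, hget, hval, hne⟩
      · rw [if_pos h1, h2]
        unfold accumulate_change_count
        split_ifs with hc <;> rfl
      · rw [if_neg hne, hget]
        unfold accumulate_change_count
        dsimp only
        rw [hval]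
        split_ifs with hc <;> rfl
    · rw [if_neg hd, if_neg hd]
      rfl

-- A's whole dict fold is the event-by-event insert fold
theorem foldl_flat (l : List (List (String × String) × Int)) :
    ∀ d : PySem.Dict (String × String) Int,
    (l.flatMap pvEventsOf).foldl
      (fun d (q : (String × String) × Int) => d.insert q.1 (d.getD q.1 0 + q.2)) d =
    l.foldl (fun change_counts p =>
      match PySem.List.pyGet? p.1 (-1) with
      | none => change_counts
      | some last =>
        if last.1 = "dleick" then
          let i := find_final_carrie_edit p.1
          if i = -1 then accumulate_change_count change_counts "Unclassified" last.2 p.2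
          else
            match PySem.List.pyGet? p.1 i with
            | none => change_counts
            | some e => accumulate_change_count change_counts e.2 last.2 p.2
        else change_counts) d := by
  induction l with
  | nil => intro d; rfl
  | cons p rest ih =>
    intro d
    simp only [List.flatMap_cons, List.foldl_append, List.foldl_cons]
    rw [ih, step_eq]

-- B's event loop collects exactly the concatenation of each history's events
theorem events_eq (l : List (List (String × String) × Int)) :
    l.foldl (fun evs p =>
      match PySem.List.pyGet? p.1 (-1) with
      | none => evs
      | some last =>
        if last.1 = "dleick" then
          let old := pvOldB p.1
          if last.2 ≠ old ∧ ¬(old = "Unclassified" ∧ last.2 = "Noise") then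
            evs ++ [((old, last.2), p.2)]
          else evs
        else evs) [] = l.flatMap pvEventsOf := by
  have hcong : l.foldl (fun evs p =>
      match PySem.List.pyGet? p.1 (-1) with
      | none => evs
      | some last =>
        if last.1 = "dleick" then
          let old := pvOldB p.1
          if last.2 ≠ old ∧ ¬(old = "Unclassified" ∧ last.2 = "Noise") then
            evs ++ [((old, last.2), p.2)]
          else evs
        else evs) [] = l.foldl (fun evs p => evs ++ pvEventsOf p) [] := by
    apply PySem.List.foldl_congr_mem
    intro acc p _
    unfold pvEventsOf
    rw [pvOldB_eq_fold]
    cases PySem.List.pyGet? p.1 (-1) with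
    | none => simp
    | some last =>
      dsimp only
      by_cases hd : last.1 = "dleick"
      · simp only [if_pos hd]
        split_ifs <;> simp
      · simp [hd]
  rw [hcong]
  simpa using PySem.List.foldl_append_eq_flatMap (l := l) (g := pvEventsOf) (acc := [])

-- the insert-accumulate fold reads back as a per-key sum over the event list
theorem getD_insert_fold (l : List ((String × String) × Int)) :
    ∀ (d : PySem.Dict (String × String) Int) (k : String × String),
    (l.foldl (fun d (q : (String × String) × Int) => d.insert q.1 (d.getD q.1 0 + q.2)) d).getD k 0
      = d.getD k 0 + ((l.filter (fun q => q.1 == k)).map (·.2)).sum := by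
  induction l with
  | nil => intro d k; simp
  | cons q rest ih =>
    intro d k
    simp only [List.foldl_cons, List.filter_cons]
    rw [ih]
    by_cases hk : q.1 = k
    · have hb : (q.1 == k) = true := by simp [hk]
      rw [hb]
      rw [PySem.Dict.getD_insert]
      simp [hk]
      ring
    · have hb : (q.1 == k) = false := by simp [hk]
      rw [hb]
      simp only [Bool.false_eq_true, if_false]
      rw [PySem.Dict.getD_insert, if_neg (Ne.symm hk)]

-- ===== VERDICT (by name: the statement is the Claim_ definition above) =====
theorem count_changes_spec : Claim_equal_count_changes := by
  intro hc _ _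
  unfold Spec_count_changes count_changes count_changes_alt
  dsimp only
  rw [events_eq]
  set ev := hc.flatMap pvEventsOf with hev
  set D := ev.foldl (fun d (q : (String × String) × Int) => d.insert q.1 (d.getD q.1 0 + q.2))
    (PySem.Dict.empty : PySem.Dict (String × String) Int) with hD
  rw [← foldl_flat, ← hD]
  have hnodup : D.keys.Nodup := by
    rw [hD]
    exact PySem.Dict.nodup_keys_foldl_insert_key ev (·.1) _ _ PySem.Dict.nodup_keys_empty
  have hkeys : D.keys = PySem.Set.ofList (ev.map (·.1)) := by
    rw [hD, PySem.Dict.keys_foldl_insert_key]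
    simp [PySem.Set.update_nil_left]
  rw [PySem.Dict.items_eq_map_keys D hnodup 0, hkeys, List.map_map]
  apply List.map_congr_left
  intro k _
  simp only [Function.comp_apply]
  rw [hD, getD_insert_fold]
  simp
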